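-- pv_equiv track=rewrite | github.com/QuecPython/tracker-box | code/extensions/gnss_service.py | check_gnss_signal
-- ===== SOURCE A (Python) =====
-- def check_gnss_signal(nmea_dict):
--
--     snr_threshold = 15
--     min_sats = 3
--     has_3d_fix = False
--     if "$GNGSA" in nmea_dict:
--         for line in nmea_dict["$GNGSA"]:
--             parts = line.split(",")
--             if len(parts) > 2 and (parts[2] == "3" or parts[2] == "2"):
--                 has_3d_fix = True
--                 break
--
--     if not has_3d_fix:
--         return False
--
--     snrs = []
--
--     def extract_snrs(lines):
--         for line in lines:
--             parts = line.split(",")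
--             i = 4
--             while i + 3 < len(parts):
--                 snr_str = parts[i + 3]
--                 if snr_str.isdigit():
--                     snrs.append(int(snr_str))
--                 i += 4
--
--     if "$GPGSV" in nmea_dict:
--         extract_snrs(nmea_dict["$GPGSV"])
--
--     if "$GBGSV" in nmea_dict:
--         extract_snrs(nmea_dict["$GBGSV"])
--
--     if "$GAGSV" in nmea_dict:
--         extract_snrs(nmea_dict["$GAGSV"])
--
--     # count satelites with SNR > 15
--     count = 0
--     for snr in snrs:
--         if snr > snr_threshold:
--             count += 1
--             if count >= min_sats:
--                 return True
--
--     return False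
-- ===== SOURCE B (Python) =====
-- def check_gnss_signal(nmea_dict):
--     # Phase 1: any GNGSA line reporting a 2D/3D fix?
--     if not any(len(p) > 2 and (p[2] == "3" or p[2] == "2")
--                for p in (line.split(",") for line in nmea_dict.get("$GNGSA", []))):
--         return False
--     # Phases 2+3 fused: count satellites with SNR > 15 directly, stopping at 3.
--     count = 0
--     for key in ("$GPGSV", "$GBGSV", "$GAGSV"):
--         for line in nmea_dict.get(key, []):
--             for field in line.split(",")[7::4]:
--                 if field.isdigit() and int(field) > 15:
--                     count += 1
--                     if count >= 3:
--                         return True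
--     return False
-- ===== Notes on version B (the rewrite author's own statement) =====
-- stated objective: simpler
-- what changed: Replaces the fix-check loop with any() over split lines, and fuses the two passes (build an snrs list with an index-striding while loop, then count it) into one direct counting pass over the [7::4] slice of each GSV line with an early return.
import Mathlib
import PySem

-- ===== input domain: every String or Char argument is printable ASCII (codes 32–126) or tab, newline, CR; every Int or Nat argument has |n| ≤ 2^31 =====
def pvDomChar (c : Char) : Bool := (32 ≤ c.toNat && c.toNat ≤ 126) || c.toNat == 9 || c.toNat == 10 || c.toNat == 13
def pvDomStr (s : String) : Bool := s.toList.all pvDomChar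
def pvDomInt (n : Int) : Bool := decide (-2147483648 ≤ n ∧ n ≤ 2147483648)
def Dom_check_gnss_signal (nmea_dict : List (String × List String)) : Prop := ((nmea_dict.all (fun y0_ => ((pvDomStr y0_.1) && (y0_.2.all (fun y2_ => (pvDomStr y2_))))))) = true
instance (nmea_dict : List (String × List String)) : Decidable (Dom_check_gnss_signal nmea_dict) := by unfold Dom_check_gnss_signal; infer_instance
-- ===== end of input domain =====

-- B replaces A's build-a-list-then-count passes by one fused counting pass over the [7::4]
-- slice of each GSV line, and the fix-check loop by any(); objective: simpler.


-- ===== PORT A =====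
-- dict lookup (first match, insertion order) shared by both ports
def pvLookup : List (String × List String) → String → Option (List String)
  | [], _ => none
  | (k, v) :: rest, key => if k == key then some v else pvLookup rest key

-- the GNGSA for-loop with break; line.split(",") is split? (sep ≠ "", so never none)
def pvGsaLoop : List String → Bool
  | [] => false
  | line :: rest =>
    let parts := (PySem.Str.split? line ",").getD []
    if parts.length > 2 && ((PySem.List.pyGetD parts 2 "") == "3" || (PySem.List.pyGetD parts 2 "") == "2")
    then true else pvGsaLoop rest
-- the inner while loop of extract_snrs (i = 4; i += 4; guard i+3 < len(parts));
-- int(s) is (PySem.Int.ofStr? s).getD 0 — exact here since isdigit guarantees ofStr? = some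
def pvExtractLine (parts : List String) (i : Nat) : List Int :=
  if h : i + 3 < parts.length then
    (if PySem.Str.strIsdigit parts[i + 3] then [(PySem.Int.ofStr? parts[i + 3]).getD 0] else [])
      ++ pvExtractLine parts (i + 4)
  else []
termination_by parts.length - i
-- extract_snrs: appends onto the accumulated snrs list
def pvExtractSnrs (snrs : List Int) (lines : List String) : List Int :=
  lines.foldl (fun acc line => acc ++ pvExtractLine ((PySem.Str.split? line ",").getD []) 4) snrs
-- the final counting loop with early return True
def pvCountLoop : List Int → Nat → Bool
  | [], _ => false
  | snr :: rest, count =>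
    if 15 < snr then
      if 3 ≤ count + 1 then true else pvCountLoop rest (count + 1)
    else pvCountLoop rest count

def check_gnss_signal (nmea_dict : List (String × List String)) : Bool :=
  let has_3d_fix := match pvLookup nmea_dict "$GNGSA" with
    | some lines => pvGsaLoop lines
    | none => false
  if !has_3d_fix then false
  else
    let snrs : List Int := []
    let snrs := match pvLookup nmea_dict "$GPGSV" with | some ls => pvExtractSnrs snrs ls | none => snrs
    let snrs := match pvLookup nmea_dict "$GBGSV" with | some ls => pvExtractSnrs snrs ls | none => snrs
    let snrs := match pvLookup nmea_dict "$GAGSV" with | some ls => pvExtractSnrs snrs ls | none => snrs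
    pvCountLoop snrs 0

-- ===== PORT B =====
-- field test: field.isdigit() and int(field) > 15 (int exact under isdigit, as above)
def pvAltGood (s : String) : Bool :=
  PySem.Str.strIsdigit s && decide (15 < (PySem.Int.ofStr? s).getD 0)
-- any(len(p) > 2 and (p[2] == "3" or p[2] == "2") for p in …)
def pvAltFix (nmea_dict : List (String × List String)) : Bool :=
  ((pvLookup nmea_dict "$GNGSA").getD []).any (fun line =>
    let p := (PySem.Str.split? line ",").getD []
    decide (p.length > 2) && ((PySem.List.pyGetD p 2 "") == "3" || (PySem.List.pyGetD p 2 "") == "2"))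
-- the three nested for-loops threading count; none = the early 'return True' fired
def pvAltFields : List String → Nat → Option Nat
  | [], c => some c
  | s :: rest, c =>
    if pvAltGood s then
      if 3 ≤ c + 1 then none else pvAltFields rest (c + 1)
    else pvAltFields rest c
-- line.split(",")[7::4]; step 4 ≠ 0, so slice? never returns none
def pvAltLines : List String → Nat → Option Nat
  | [], c => some c
  | line :: rest, c =>
    match pvAltFields ((PySem.List.slice? ((PySem.Str.split? line ",").getD []) (some 7) none 4).getD []) c with
    | none => none
    | some c' => pvAltLines rest c'
def pvAltKeys (nmea_dict : List (String × List String)) : List String → Nat → Option Nat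
  | [], c => some c
  | k :: ks, c =>
    match pvAltLines ((pvLookup nmea_dict k).getD []) c with
    | none => none
    | some c' => pvAltKeys nmea_dict ks c'

def check_gnss_signal_alt (nmea_dict : List (String × List String)) : Bool :=
  if !(pvAltFix nmea_dict) then false
  else match pvAltKeys nmea_dict ["$GPGSV", "$GBGSV", "$GAGSV"] 0 with
    | none => true
    | some _ => false

-- ===== PRECONDITION & SPEC =====
def Spec_check_gnss_signal (nmea_dict : List (String × List String)) (out : Bool) : Prop := out = check_gnss_signal_alt nmea_dict
instance (nmea_dict : List (String × List String)) (out : Bool) : Decidable (Spec_check_gnss_signal nmea_dict out) := by unfold Spec_check_gnss_signal; infer_instance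

-- ===== CLAIM (what is proved, stated in full; the proofs are below) =====
def Claim_equal_check_gnss_signal : Prop := ∀ (nmea_dict : List (String × List String)), Dom_check_gnss_signal nmea_dict → Spec_check_gnss_signal nmea_dict (check_gnss_signal nmea_dict)

-- ===== LEMMAS AND PROOFS =====

-- proof-side helper: the fields at indices j, j+4, j+8, ... of xs
def pvStride (xs : List String) (j : Nat) : List String :=
  if h : j < xs.length then xs[j] :: pvStride xs (j + 4) else []
termination_by xs.length - j

-- per-line / per-key good-field counts (the common spec of both programs' loops)
def pvLineCnt (line : String) : Nat :=
  (pvStride ((PySem.Str.split? line ",").getD []) 7).countP pvAltGood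
def pvLinesCnt (lines : List String) : Nat := (lines.map pvLineCnt).sum
def pvKeyCnt (nmea_dict : List (String × List String)) (k : String) : Nat :=
  pvLinesCnt ((pvLookup nmea_dict k).getD [])

theorem pvStride_nil (xs : List String) (j : Nat) (h : ¬ j < xs.length) : pvStride xs j = [] := by
  unfold pvStride; simp [h]

theorem pvFilterMap_stride (xs : List String) (C j : Nat) (hC : xs.length ≤ j + 4 * C) :
    (List.range C).filterMap (fun (k : Nat) => xs[((j : Int) + 4 * (k : Int)).toNat]?) = pvStride xs j := by
  induction C generalizing j with
  | zero => simp [pvStride_nil xs j (by omega)]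
  | succ C ih =>
    rw [List.range_succ_eq_map, List.filterMap_cons, List.filterMap_map]
    have hfun : ((fun (k : Nat) => xs[((j : Int) + 4 * (k : Int)).toNat]?) ∘ Nat.succ)
        = (fun (k : Nat) => xs[(((j + 4 : Nat) : Int) + 4 * (k : Int)).toNat]?) := by
      funext k; simp only [Function.comp_apply]; congr 1; push_cast; omega
    rw [hfun, ih (j + 4) (by omega)]
    by_cases hj : j < xs.length
    · conv_rhs => rw [pvStride]
      simp [hj]
    · rw [pvStride_nil xs (j + 4) (by omega), pvStride_nil xs j hj]
      simp [List.getElem?_eq_none (show xs.length ≤ j by omega)]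

theorem pvSlice_stride (xs : List String) :
    PySem.List.slice? xs (some 7) none 4 = some (pvStride xs 7) := by
  rw [PySem.List.slice?]
  simp only [PySem.List.sliceIndices, if_neg (by norm_num : ¬ (4:Int) = 0)]
  norm_num
  by_cases hj : 7 < xs.length
  · have hmin : min (7 : Int) (xs.length : Int) = 7 := by omega
    rw [hmin, if_pos (by exact_mod_cast hj)]
    have h := pvFilterMap_stride xs (((xs.length : Int) - 7 + 4 - 1) / 4).toNat 7 (by omega)
    simpa using h
  · have hmin : min (7 : Int) (xs.length : Int) = (xs.length : Int) := by omega
    rw [hmin, if_neg (by omega)]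
    simp [pvStride_nil xs 7 hj]

-- Phase 1: A's loop-with-break is B's any()
theorem pvGsa_any (lines : List String) :
    pvGsaLoop lines = lines.any (fun line =>
      let p := (PySem.Str.split? line ",").getD []
      decide (p.length > 2) && ((PySem.List.pyGetD p 2 "") == "3" || (PySem.List.pyGetD p 2 "") == "2")) := by
  induction lines with
  | nil => rfl
  | cons l rest ih =>
    rw [List.any_cons, ← ih]
    simp only [pvGsaLoop]
    cases h : (decide (((PySem.Str.split? l ",").getD []).length > 2) &&
        ((PySem.List.pyGetD ((PySem.Str.split? l ",").getD []) 2 "") == "3" ||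
         (PySem.List.pyGetD ((PySem.Str.split? l ",").getD []) 2 "") == "2")) <;>
      simp [h]

-- A's while loop collects, per stride field, exactly what pvAltGood counts
theorem pvExtract_countP (parts : List String) (i : Nat) :
    (pvExtractLine parts i).countP (fun n => decide (15 < n))
      = (pvStride parts (i + 3)).countP pvAltGood := by
  rw [pvExtractLine, pvStride]
  by_cases h : i + 3 < parts.length
  · simp only [dif_pos h]
    have ih := pvExtract_countP parts (i + 4)
    rw [List.countP_append, List.countP_cons, ih,
        show i + 3 + 4 = i + 4 + 3 from by omega]
    by_cases hd : PySem.Chars.strIsdigit parts[i + 3].toList <;>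
      by_cases hv : 15 < (PySem.Int.ofStr? parts[i + 3]).getD 0 <;>
        simp [pvAltGood, hd, hv] <;> omega
  · simp only [dif_neg h]
    rfl
termination_by parts.length - i

theorem pvExtractSnrs_countP (lines : List String) (snrs : List Int) :
    (pvExtractSnrs snrs lines).countP (fun n => decide (15 < n))
      = snrs.countP (fun n => decide (15 < n)) + pvLinesCnt lines := by
  induction lines generalizing snrs with
  | nil => simp [pvExtractSnrs, pvLinesCnt]
  | cons l rest ih =>
    rw [pvExtractSnrs, List.foldl_cons, ← pvExtractSnrs, ih, List.countP_append,
        pvExtract_countP]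
    have : (pvStride ((PySem.Str.split? l ",").getD []) (4 + 3)).countP pvAltGood
        = pvLineCnt l := rfl
    rw [this]
    simp [pvLinesCnt]
    omega

theorem pvCountLoop_spec (l : List Int) (c : Nat) (hc : c < 3) :
    pvCountLoop l c = decide (3 ≤ c + l.countP (fun n => decide (15 < n))) := by
  induction l generalizing c with
  | nil =>
    simp only [pvCountLoop, List.countP_nil, Nat.add_zero]
    have : ¬ 3 ≤ c := by omega
    simp [this]
  | cons x rest ih =>
    rw [pvCountLoop, List.countP_cons]
    generalize hR : rest.countP (fun n => decide (15 < n)) = R at ih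
    by_cases hx : 15 < x
    · rw [if_pos hx]
      by_cases h3 : 3 ≤ c + 1
      · rw [if_pos h3]
        simp [hx]
        omega
      · rw [if_neg h3, ih (c + 1) (by omega)]
        have he : c + 1 + R = c + (R + 1) := by omega
        simp [hx, he]
    · rw [if_neg hx, ih c hc]
      simp [hx]

theorem pvAltFields_spec (fs : List String) (c : Nat) (hc : c < 3) :
    pvAltFields fs c =
      if 3 ≤ c + fs.countP pvAltGood then none else some (c + fs.countP pvAltGood) := by
  induction fs generalizing c with
  | nil =>
    have : ¬ 3 ≤ c := by omega
    simp [pvAltFields, this]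
  | cons s rest ih =>
    rw [pvAltFields, List.countP_cons]
    generalize hR : rest.countP pvAltGood = R at ih
    by_cases hg : pvAltGood s
    · rw [if_pos hg]
      by_cases h3 : 3 ≤ c + 1
      · rw [if_pos h3, if_pos (by simp [hg]; omega)]
      · rw [if_neg h3, ih (c + 1) (by omega)]
        have he : c + 1 + R = c + (R + 1) := by omega
        simp [hg, he]
    · rw [if_neg hg, ih c hc]
      simp [hg]

theorem pvAltLines_spec (lines : List String) (c : Nat) (hc : c < 3) :
    pvAltLines lines c =
      if 3 ≤ c + pvLinesCnt lines then none else some (c + pvLinesCnt lines) := by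
  induction lines generalizing c with
  | nil =>
    have : ¬ 3 ≤ c := by omega
    simp [pvAltLines, pvLinesCnt, this]
  | cons l rest ih =>
    rw [pvAltLines, pvSlice_stride]
    simp only [Option.getD_some]
    rw [pvAltFields_spec _ c hc,
        show (pvStride ((PySem.Str.split? l ",").getD []) 7).countP pvAltGood = pvLineCnt l
          from rfl,
        show pvLinesCnt (l :: rest) = pvLineCnt l + pvLinesCnt rest from by
          simp [pvLinesCnt, pvLineCnt]]
    by_cases h3 : 3 ≤ c + pvLineCnt l
    · rw [if_pos h3, if_pos (by omega)]
    · rw [if_neg h3]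
      change pvAltLines rest (c + pvLineCnt l) = _
      rw [ih (c + pvLineCnt l) (by omega), Nat.add_assoc]

theorem pvAltKeys_spec (nmea_dict : List (String × List String)) (ks : List String) (c : Nat)
    (hc : c < 3) :
    (pvAltKeys nmea_dict ks c = none) ↔ (3 ≤ c + (ks.map (pvKeyCnt nmea_dict)).sum) := by
  induction ks generalizing c with
  | nil =>
    simp [pvAltKeys]
    omega
  | cons k rest ih =>
    rw [pvAltKeys, pvAltLines_spec _ c hc]
    simp only [List.map_cons, List.sum_cons]
    by_cases h3 : 3 ≤ c + pvLinesCnt ((pvLookup nmea_dict k).getD [])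
    · rw [if_pos h3]
      simp only [pvKeyCnt]
      exact ⟨fun _ => by omega, fun _ => trivial⟩
    · rw [if_neg h3]
      show pvAltKeys nmea_dict rest (c + pvLinesCnt ((pvLookup nmea_dict k).getD [])) = none ↔ _
      rw [ih _ (by omega)]
      simp only [pvKeyCnt]
      omega

-- ===== VERDICT (by name: the statement is the Claim_ definition above) =====
theorem check_gnss_signal_spec : Claim_equal_check_gnss_signal := by
  intro nmea_dict _
  unfold Spec_check_gnss_signal check_gnss_signal check_gnss_signal_alt
  rw [show pvAltFix nmea_dict = (match pvLookup nmea_dict "$GNGSA" with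
        | some lines => pvGsaLoop lines
        | none => false) from by
    unfold pvAltFix
    cases pvLookup nmea_dict "$GNGSA" <;> simp [pvGsa_any]]
  cases hfix : (match pvLookup nmea_dict "$GNGSA" with
      | some lines => pvGsaLoop lines
      | none => false) with
  | false => rfl
  | true =>
    simp only [Bool.not_true, Bool.false_eq_true, if_false]
    have hsnr : ∀ (snrs : List Int) (k : String),
        (match pvLookup nmea_dict k with
          | some ls => pvExtractSnrs snrs ls
          | none => snrs).countP (fun n => decide (15 < n))
        = snrs.countP (fun n => decide (15 < n)) + pvKeyCnt nmea_dict k := by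
      intro snrs k
      unfold pvKeyCnt
      cases pvLookup nmea_dict k <;>
        simp [pvExtractSnrs_countP, pvLinesCnt]
    rw [pvCountLoop_spec _ 0 (by omega)]
    have hk := pvAltKeys_spec nmea_dict ["$GPGSV", "$GBGSV", "$GAGSV"] 0 (by omega)
    simp only [List.map_cons, List.map_nil, List.sum_cons, List.sum_nil, Nat.add_zero,
      Nat.zero_add] at hk
    simp only [hsnr, List.countP_nil, Nat.zero_add]
    cases hA : pvAltKeys nmea_dict ["$GPGSV", "$GBGSV", "$GAGSV"] 0 <;>
      rw [hA] at hk <;> simp_all <;> omega
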